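-- pv_equiv track=rewrite | github.com/aiperceivable/apcore-toolkit-python | src/apcore_toolkit/formatting/surface.py | _yaml_scalar
-- ===== SOURCE A (Python) =====
-- def _yaml_scalar(text: str) -> str:
--     """Quote a string for safe YAML scalar emission when needed."""
--     if text == "":
--         return '""'
--     needs_quote = any(c in text for c in (":", "#", "{", "}", "[", "]", "'", '"', "\n", "&", "*", "!", "|", ">"))
--     if not needs_quote and not text.startswith(("-", "?", "%", "@", "`")):
--         return text
--     escaped = text.replace("\\", "\\\\").replace('"', '\\"')
--     return f'"{escaped}"'
-- ===== SOURCE B (Python) =====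
-- _SPECIALS = ":#{}[]'\"\n&*!|>"
-- _LEAD = "-?%@`"
--
--
-- def _yaml_scalar(text: str) -> str:
--     """Quote a string for safe YAML scalar emission when needed."""
--     if not text:
--         return '""'
--     quote = text[0] in _LEAD
--     parts = []
--     for c in text:
--         if c in _SPECIALS:
--             quote = True
--         if c == "\\":
--             parts.append("\\\\")
--         elif c == '"':
--             parts.append('\\"')
--         else:
--             parts.append(c)
--     if quote:
--         return '"' + "".join(parts) + '"'
--     return text
-- ===== Notes on version B (the rewrite author's own statement) =====
-- stated objective: alternative
-- what changed: B makes ONE fused pass over the characters with an accumulator that simultaneously computes the quote flag and builds the escaped text, instead of A's staged passes: one full-string substring scan per special character (14 scans), a tuple startswith, and then two chained whole-string str.replace passes.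
import Mathlib
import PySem

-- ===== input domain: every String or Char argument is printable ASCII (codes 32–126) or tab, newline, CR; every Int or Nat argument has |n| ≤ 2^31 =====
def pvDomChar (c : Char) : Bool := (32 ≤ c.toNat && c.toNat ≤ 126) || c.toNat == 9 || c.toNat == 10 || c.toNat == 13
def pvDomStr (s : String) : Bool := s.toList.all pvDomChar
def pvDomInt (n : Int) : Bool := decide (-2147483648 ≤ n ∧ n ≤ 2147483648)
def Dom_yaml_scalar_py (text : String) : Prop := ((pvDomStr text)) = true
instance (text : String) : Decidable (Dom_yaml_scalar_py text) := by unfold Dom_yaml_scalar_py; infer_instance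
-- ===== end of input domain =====

-- B replaces A's staged passes (one substring scan per special character, a tuple startswith, then two
-- whole-string replace passes) by ONE fused pass over the characters that computes the quote flag and
-- builds the escaped text simultaneously in an accumulator; objective: alternative (not claimed faster).

-- ===== PORT A =====
-- A scans the whole string once per special character ('c in text'), checks startswith on a 5-tuple,
-- then escapes with two chained str.replace passes.
def yaml_scalar_py (text : String) : String :=
  if text = "" then "\"\""
  else
    let l := text.toList
    let needs_quote :=
      [":", "#", "{", "}", "[", "]", "'", "\"", "\n", "&", "*", "!", "|", ">"].any
        (fun c => PySem.Chars.isIn c.toList l)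
    if !needs_quote && !(["-", "?", "%", "@", "`"].any (fun p => PySem.Chars.startswith l p.toList)) then
      text
    else
      let escaped := PySem.Chars.replace (PySem.Chars.replace l ['\\'] ['\\', '\\']) ['"'] ['\\', '"']
      String.ofList ('"' :: escaped ++ ['"'])

-- ===== PORT B =====
-- _SPECIALS and _LEAD are module-level constant strings in Source B
def ySPECIALS : List Char := ":#{}[]'\"\n&*!|>".toList
def yLEAD : List Char := "-?%@`".toList

-- the body of Source B's for-loop: one step updates (quote flag, parts accumulator)
def yStep (st : Bool × List Char) (c : Char) : Bool × List Char :=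
  ((if ySPECIALS.contains c then true else st.1),
   st.2 ++ (if c = '\\' then ['\\', '\\'] else if c = '"' then ['\\', '"'] else [c]))

def yaml_scalar_py_alt (text : String) : String :=
  match text.toList with
  | [] => "\"\""
  | c0 :: _ =>
    let st := text.toList.foldl yStep (yLEAD.contains c0, [])
    if st.1 then String.ofList ('"' :: st.2 ++ ['"']) else text

-- ===== PRECONDITION & SPEC =====
def Spec_yaml_scalar_py (text : String) (out : String) : Prop := out = yaml_scalar_py_alt text
instance (text : String) (out : String) : Decidable (Spec_yaml_scalar_py text out) := by unfold Spec_yaml_scalar_py; infer_instance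

-- ===== CLAIM (what is proved, stated in full; the proofs are below) =====
def Claim_equal_yaml_scalar_py : Prop := ∀ (text : String), Dom_yaml_scalar_py text → Spec_yaml_scalar_py text (yaml_scalar_py text)

-- ===== LEMMAS AND PROOFS =====

-- per-character escape map (the value of one loop iteration's contribution to parts)
def yEsc (c : Char) : List Char :=
  if c = '\\' then ['\\', '\\'] else if c = '"' then ['\\', '"'] else [c]

-- B's fold, characterized: flag = init || some char special; parts = acc ++ concat of yEsc
theorem foldl_yStep (l : List Char) (b : Bool) (acc : List Char) :
    l.foldl yStep (b, acc) = (b || l.any (fun c => ySPECIALS.contains c), acc ++ l.flatMap yEsc) := by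
  induction l generalizing b acc with
  | nil => simp
  | cons c t ih =>
    simp only [List.foldl_cons, yStep, List.any_cons, List.flatMap_cons, ih]
    refine Prod.ext ?_ ?_
    · cases h : ySPECIALS.contains c <;> simp
    · simp [yEsc, List.append_assoc]

-- replace with a single-character pattern is a per-character flatMap (worker lemma)
theorem replace_go_singleton (o : Char) (new : List Char) :
    ∀ (fuel : Nat) (l acc : List Char), l.length ≤ fuel →
      PySem.Chars.replace.go [o] new fuel l acc
        = acc.reverse ++ l.flatMap (fun c => if c = o then new else [c]) := by
  intro fuel
  induction fuel with
  | zero =>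
    intro l acc h
    have : l = [] := List.eq_nil_of_length_eq_zero (Nat.le_zero.mp h)
    subst this; simp [PySem.Chars.replace.go]
  | succ n ih =>
    intro l acc h
    cases l with
    | nil => simp [PySem.Chars.replace.go]
    | cons c t =>
      simp only [List.length_cons, Nat.succ_le_succ_iff] at h
      by_cases hc : c = o
      · subst hc
        have hp : List.isPrefixOf [c] (c :: t) = true := by simp [List.isPrefixOf]
        simp only [PySem.Chars.replace.go, hp, List.length_cons, List.length_nil,
          List.drop_succ_cons, List.drop_zero]
        rw [ih t (new.reverse ++ acc) h]
        simp [List.flatMap_cons]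
      · have hp : List.isPrefixOf [o] (c :: t) = false := by
          simp [List.isPrefixOf]; exact fun h' => absurd h'.symm hc
        simp only [PySem.Chars.replace.go, hp, Bool.false_eq_true, if_false]
        rw [ih t (c :: acc) h]
        simp [List.flatMap_cons, hc]

theorem replace_singleton (o : Char) (new l : List Char) :
    PySem.Chars.replace l [o] new = l.flatMap (fun c => if c = o then new else [c]) := by
  rw [PySem.Chars.replace]
  simp only [List.isEmpty_cons, Bool.false_eq_true, if_false]
  exact replace_go_singleton o new l.length l [] le_rfl

-- A's two chained replaces equal B's one-shot per-character escape
theorem escaped_eq (l : List Char) :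
    PySem.Chars.replace (PySem.Chars.replace l ['\\'] ['\\', '\\']) ['"'] ['\\', '"']
      = l.flatMap yEsc := by
  rw [replace_singleton, replace_singleton, List.flatMap_assoc]
  apply List.flatMap_congr
  intro c _
  by_cases h1 : c = '\\'
  · subst h1; decide
  · by_cases h2 : c = '"'
    · subst h2; decide
    · simp [h1, h2, yEsc]

-- single-character substring containment ('c in text' for a 1-char c) is character membership
theorem isIn_singleton_eq_contains (c : Char) (l : List Char) :
    PySem.Chars.isIn [c] l = l.contains c := by
  rcases h : PySem.Chars.isIn [c] l with _ | _
  · rw [PySem.Chars.isIn_eq_false_iff] at h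
    rw [List.singleton_infix_iff] at h
    simp [h]
  · rw [PySem.Chars.isIn_iff_infix] at h
    rw [List.singleton_infix_iff] at h
    simp [h]

-- startswith with a single-character prefix is an equality test on the first character
theorem startswith_singleton (c0 p : Char) (rest : List Char) :
    PySem.Chars.startswith (c0 :: rest) [p] = (c0 == p) := by
  rw [Bool.eq_iff_iff, PySem.Chars.startswith_iff, List.cons_prefix_cons]
  constructor
  · rintro ⟨rfl, -⟩; simp
  · intro h; exact ⟨(beq_iff_eq.mp h).symm, List.nil_prefix⟩

-- A's needs_quote scan equals the any-char-special test of B's fold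
theorem needs_quote_eq (l : List Char) :
    ([":", "#", "{", "}", "[", "]", "'", "\"", "\n", "&", "*", "!", "|", ">"].any
        (fun c => PySem.Chars.isIn c.toList l))
      = l.any (fun c => ySPECIALS.contains c) := by
  have hfwd : ∀ s ∈ [":", "#", "{", "}", "[", "]", "'", "\"", "\n", "&", "*", "!", "|", ">"],
      ∃ c, s.toList = [c] ∧ c ∈ ySPECIALS := by
    intro s hs
    fin_cases hs <;> first
      | exact ⟨':', rfl, by decide⟩ | exact ⟨'#', rfl, by decide⟩ | exact ⟨'{', rfl, by decide⟩
      | exact ⟨'}', rfl, by decide⟩ | exact ⟨'[', rfl, by decide⟩ | exact ⟨']', rfl, by decide⟩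
      | exact ⟨'\'', rfl, by decide⟩ | exact ⟨'"', rfl, by decide⟩ | exact ⟨'\n', rfl, by decide⟩
      | exact ⟨'&', rfl, by decide⟩ | exact ⟨'*', rfl, by decide⟩ | exact ⟨'!', rfl, by decide⟩
      | exact ⟨'|', rfl, by decide⟩ | exact ⟨'>', rfl, by decide⟩
  rcases hA : ([":", "#", "{", "}", "[", "]", "'", "\"", "\n", "&", "*", "!", "|", ">"].any
      (fun c => PySem.Chars.isIn c.toList l)) with _ | _
  · simp only [List.any_eq_false] at hA
    symm
    simp only [List.any_eq_false]
    intro c hc hmem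
    simp only [List.contains_eq_mem, decide_eq_true_eq] at hmem
    have hmem' : c ∈ [':', '#', '{', '}', '[', ']', '\'', '"', '\n', '&', '*', '!', '|', '>'] := by
      have : ySPECIALS = [':', '#', '{', '}', '[', ']', '\'', '"', '\n', '&', '*', '!', '|', '>'] := by decide
      rwa [this] at hmem
    have hs : ∃ s ∈ [":", "#", "{", "}", "[", "]", "'", "\"", "\n", "&", "*", "!", "|", ">"],
        s.toList = [c] := by
      fin_cases hmem' <;> first
        | exact ⟨":", by simp, rfl⟩ | exact ⟨"#", by simp, rfl⟩ | exact ⟨"{", by simp, rfl⟩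
        | exact ⟨"}", by simp, rfl⟩ | exact ⟨"[", by simp, rfl⟩ | exact ⟨"]", by simp, rfl⟩
        | exact ⟨"'", by simp, rfl⟩ | exact ⟨"\"", by simp, rfl⟩ | exact ⟨"\n", by simp, rfl⟩
        | exact ⟨"&", by simp, rfl⟩ | exact ⟨"*", by simp, rfl⟩ | exact ⟨"!", by simp, rfl⟩
        | exact ⟨"|", by simp, rfl⟩ | exact ⟨">", by simp, rfl⟩
    obtain ⟨s, hsmem, hseq⟩ := hs
    have := hA s hsmem
    rw [hseq, isIn_singleton_eq_contains] at this
    simp [List.contains_eq_mem, hc] at this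
  · simp only [List.any_eq_true] at hA
    obtain ⟨s, hsmem, hsin⟩ := hA
    obtain ⟨c, hceq, hcs⟩ := hfwd s hsmem
    rw [hceq, isIn_singleton_eq_contains] at hsin
    symm
    simp only [List.any_eq_true]
    exact ⟨c, by simpa [List.contains_eq_mem] using hsin, by simp [List.contains_eq_mem, hcs]⟩

-- A's tuple-startswith test equals B's membership test on the first character
theorem startswith_eq_lead (c0 : Char) (rest : List Char) :
    (["-", "?", "%", "@", "`"].any (fun p => PySem.Chars.startswith (c0 :: rest) p.toList))
      = yLEAD.contains c0 := by
  have t1 : "-".toList = ['-'] := rfl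
  have t2 : "?".toList = ['?'] := rfl
  have t3 : "%".toList = ['%'] := rfl
  have t4 : "@".toList = ['@'] := rfl
  have t5 : "`".toList = ['`'] := rfl
  have hL : yLEAD = ['-', '?', '%', '@', '`'] := by decide
  simp only [List.any_cons, List.any_nil, t1, t2, t3, t4, t5, startswith_singleton, hL]
  simp only [beq_eq_decide, Bool.or_false, List.contains_eq_mem, List.mem_cons, List.not_mem_nil, or_false, Bool.decide_or]

-- ===== VERDICT (by name: the statement is the Claim_ definition above) =====
theorem yaml_scalar_py_spec : Claim_equal_yaml_scalar_py := by
  intro text _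
  unfold Spec_yaml_scalar_py yaml_scalar_py yaml_scalar_py_alt
  rcases h : text.toList with _ | ⟨c0, rest⟩
  · have : text = "" := String.toList_eq_nil_iff.mp h
    simp [this]
  · have hne : text ≠ "" := by
      intro he; rw [he] at h; simp at h
    simp only [if_neg hne]
    rw [foldl_yStep, needs_quote_eq, escaped_eq, startswith_eq_lead]
    cases hq : (c0 :: rest).any (fun c => ySPECIALS.contains c) <;>
      cases hl : yLEAD.contains c0 <;> simp
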